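-- pv_equiv track=rewrite | github.com/mmadan1521/repo_algo | graphs/max_twitter_influencer.py | find_followers
-- ===== SOURCE A (Python) =====
-- def find_followers(key: str, graph_edges: dict, visited_vertex_list: dict) -> int:
--    if key in graph_edges:
--       if key not in visited_vertex_list:
--          visited_vertex_list[key] = 1
--          for item in graph_edges[key]:
--             visited_vertex_list[key] += find_followers(item, graph_edges, visited_vertex_list)
--          return visited_vertex_list[key]
--       else:
--          return 0
--    elif key not in graph_edges:
--       return 1
-- ===== SOURCE B (Python) =====
-- def find_followers(key: str, graph_edges: dict, visited_vertex_list: dict) -> int: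
--     if key not in graph_edges:
--         return 1
--     if key in visited_vertex_list:
--         return 0
--     visited_vertex_list[key] = 1
--     stack = [(key, list(graph_edges[key]))]
--     while stack:
--         node, todo = stack.pop()
--         if todo:
--             c = todo[0]
--             stack.append((node, todo[1:]))
--             if c not in graph_edges:
--                 visited_vertex_list[node] += 1
--             elif c not in visited_vertex_list:
--                 visited_vertex_list[c] = 1
--                 stack.append((c, list(graph_edges[c])))
--         elif stack:
--             visited_vertex_list[stack[-1][0]] += visited_vertex_list[node]
--     return visited_vertex_list[key]
-- ===== Notes on version B (the rewrite author's own statement) =====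
-- stated objective: alternative
-- what changed: B replaces A's memoized recursion by an iterative DFS driven by an explicit stack of (node, remaining-children) frames: children are consumed one at a time from the frame on top of the stack, leaf children increment the current node's counter in place, fresh internal children are marked and pushed, and a completed frame folds its accumulated count into the frame below it; no recursion remains and the visited dict is mutated identically to A.
import Mathlib
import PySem

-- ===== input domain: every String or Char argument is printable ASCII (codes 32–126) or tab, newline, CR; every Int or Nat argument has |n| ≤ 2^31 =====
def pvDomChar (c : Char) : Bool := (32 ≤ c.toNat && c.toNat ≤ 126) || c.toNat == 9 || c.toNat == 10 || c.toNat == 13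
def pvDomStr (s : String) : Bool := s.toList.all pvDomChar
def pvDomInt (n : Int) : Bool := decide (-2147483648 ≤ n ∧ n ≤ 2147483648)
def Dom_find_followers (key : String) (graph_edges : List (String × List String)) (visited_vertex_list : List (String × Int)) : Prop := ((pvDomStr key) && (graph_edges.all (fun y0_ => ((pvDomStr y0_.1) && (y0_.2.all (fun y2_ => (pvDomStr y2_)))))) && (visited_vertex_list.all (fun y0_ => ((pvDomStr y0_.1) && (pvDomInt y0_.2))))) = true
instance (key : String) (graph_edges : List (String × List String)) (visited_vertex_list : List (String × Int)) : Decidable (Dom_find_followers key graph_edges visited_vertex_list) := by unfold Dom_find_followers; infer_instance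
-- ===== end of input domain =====

-- B replaces A's memoized recursion by an iterative DFS with an explicit stack of
-- (node, remaining-children) frames (alternative decomposition, same asymptotic cost).
-- Both A and B mutate visited_vertex_list identically; the equivalence proved here is
-- about the RETURN value.

-- ===== PORT A =====
-- A's recursion terminates because every recursive descent first adds a fresh graph key to the
-- visited dict; the fuel (number of distinct graph keys + 1) is a totality guard consumed exactly
-- on that descent and never exhausted with the fuel supplied.
mutual
def goA (fuel : Nat) (key : String) (g : PySem.Dict String (List String)) (v : PySem.Dict String Int) : Int × PySem.Dict String Int :=
  if g.contains key then
    if v.contains key then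
      (0, v)                                   -- return 0
    else
      match fuel with
      | 0 => (0, v)                            -- fuel guard, unreachable with the fuel supplied
      | fuel + 1 =>
        let v1 := v.insert key 1               -- visited_vertex_list[key] = 1
        let v2 := loopA fuel (g.getD key []) key g v1
        (v2.getD key 0, v2)                    -- return visited_vertex_list[key] (key always present here)
  else (1, v)                                  -- return 1
  termination_by (fuel, 0)

def loopA (fuel : Nat) (items : List String) (key : String) (g : PySem.Dict String (List String)) (v : PySem.Dict String Int) : PySem.Dict String Int :=
  match items with
  | [] => v
  | _item :: rest =>
    let r := goA fuel _item g v                -- find_followers(item, …)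
    loopA fuel rest key g (r.2.modify key 0 (· + r.1))   -- visited_vertex_list[key] += …
  termination_by (fuel, items.length + 1)
end

def find_followers (key : String) (graph_edges : List (String × List String)) (visited_vertex_list : List (String × Int)) : Int :=
  let g := PySem.Dict.ofList graph_edges
  (goA (g.keys.length + 1) key g (PySem.Dict.ofList visited_vertex_list)).1

-- ===== PORT B =====
-- Source B's stack of (node, remaining-children) frames; szB is the termination measure of the
-- while loop at constant fuel, fuel is consumed exactly when a fresh internal node is pushed
-- (unreachable exhaustion, same guard style as A's port).
def szB : List (String × List String) → Nat
  | [] => 0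
  | (_, t) :: r => t.length + 1 + szB r

def runB (fuel : Nat) (g : PySem.Dict String (List String)) (stack : List (String × List String)) (v : PySem.Dict String Int) : PySem.Dict String Int :=
  match stack with
  | [] => v                                                -- while stack: … ends
  | (node, todo) :: rest =>                                -- node, todo = stack.pop()
    match todo with
    | c :: todo' =>                                        -- if todo: c = todo[0]; stack.append((node, todo[1:]))
      if !g.contains c then
        runB fuel g ((node, todo') :: rest) (v.modify node 0 (· + 1))          -- visited[node] += 1
      else if v.contains c then
        runB fuel g ((node, todo') :: rest) v                                   -- already visited: nothing
      else
        match fuel with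
        | 0 => v                                           -- fuel guard, unreachable with the fuel supplied
        | f + 1 =>
          runB f g ((c, g.getD c []) :: (node, todo') :: rest) (v.insert c 1)   -- visited[c] = 1; push c
    | [] =>
      match rest with
      | [] => v                                            -- root frame done, loop ends
      | (p, q) :: rest' => runB fuel g ((p, q) :: rest') (v.modify p 0 (· + v.getD node 0))   -- fold into parent
  termination_by (fuel, szB stack)
  decreasing_by all_goals (simp [szB, Prod.lex_iff]; try omega)

def find_followers_alt (key : String) (graph_edges : List (String × List String)) (visited_vertex_list : List (String × Int)) : Int :=
  let g := PySem.Dict.ofList graph_edges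
  let v := PySem.Dict.ofList visited_vertex_list
  if !g.contains key then 1
  else if v.contains key then 0
  else
    let v1 := v.insert key 1
    (runB (g.keys.length + 1) g [(key, g.getD key [])] v1).getD key 0

-- ===== PRECONDITION & SPEC =====
def Spec_find_followers (key : String) (graph_edges : List (String × List String)) (visited_vertex_list : List (String × Int)) (out : Int) : Prop := out = find_followers_alt key graph_edges visited_vertex_list
instance (key : String) (graph_edges : List (String × List String)) (visited_vertex_list : List (String × Int)) (out : Int) : Decidable (Spec_find_followers key graph_edges visited_vertex_list out) := by unfold Spec_find_followers; infer_instance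

-- ===== CLAIM (what is proved, stated in full; the proofs are below) =====
def Claim_equal_find_followers : Prop := ∀ (key : String) (graph_edges : List (String × List String)) (visited_vertex_list : List (String × Int)), Dom_find_followers key graph_edges visited_vertex_list → Spec_find_followers key graph_edges visited_vertex_list (find_followers key graph_edges visited_vertex_list)

-- ===== LEMMAS AND PROOFS =====

-- unfolding lemmas for the ports
theorem goA_leaf (fuel : Nat) (c : String) (g : PySem.Dict String (List String)) (v : PySem.Dict String Int)
    (h : g.contains c = false) : goA fuel c g v = (1, v) := by
  cases fuel <;> simp [goA, h]

theorem goA_visited (fuel : Nat) (c : String) (g : PySem.Dict String (List String)) (v : PySem.Dict String Int)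
    (hg : g.contains c = true) (hv : v.contains c = true) : goA fuel c g v = (0, v) := by
  cases fuel <;> simp [goA, hg, hv]

theorem goA_fresh (f : Nat) (key : String) (g : PySem.Dict String (List String)) (v : PySem.Dict String Int)
    (hg : g.contains key = true) (hv : v.contains key = false) :
    goA (f + 1) key g v =
      ((loopA f (g.getD key []) key g (v.insert key 1)).getD key 0,
        loopA f (g.getD key []) key g (v.insert key 1)) := by
  simp [goA, hg, hv]

theorem loopA_nil (f : Nat) (key : String) (g : PySem.Dict String (List String)) (v : PySem.Dict String Int) :
    loopA f [] key g v = v := by simp [loopA]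

theorem loopA_cons (f : Nat) (c : String) (rest : List String) (key : String)
    (g : PySem.Dict String (List String)) (v : PySem.Dict String Int) :
    loopA f (c :: rest) key g v =
      loopA f rest key g ((goA f c g v).2.modify key 0 (· + (goA f c g v).1)) := by
  simp [loopA]

-- contains is preserved by goA / loopA
theorem contains_loopA (fuel : Nat)
    (hA : ∀ (key : String) (g : PySem.Dict String (List String)) (v : PySem.Dict String Int) (x : String),
      v.contains x = true → ((goA fuel key g v).2).contains x = true) :
    ∀ (items : List String) (key : String) (g : PySem.Dict String (List String)) (v : PySem.Dict String Int) (x : String),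
      v.contains x = true → (loopA fuel items key g v).contains x = true := by
  intro items
  induction items with
  | nil => intro key g v x hx; simpa [loopA_nil] using hx
  | cons c rest ih =>
    intro key g v x hx
    rw [loopA_cons]
    apply ih
    rw [PySem.Dict.contains_modify]
    simp [hA c g v x hx]

theorem contains_goA : ∀ (fuel : Nat) (key : String) (g : PySem.Dict String (List String)) (v : PySem.Dict String Int) (x : String),
    v.contains x = true → ((goA fuel key g v).2).contains x = true := by
  intro fuel
  induction fuel with
  | zero =>
    intro key g v x hx
    by_cases hg : g.contains key = true
    · by_cases hv : v.contains key = true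
      · rw [goA_visited _ _ _ _ hg hv]; exact hx
      · simp [goA, hg, hv, hx]
    · rw [goA_leaf _ _ _ _ (by simpa using hg)]; exact hx
  | succ f ih =>
    intro key g v x hx
    by_cases hg : g.contains key = true
    · by_cases hv : v.contains key = true
      · rw [goA_visited _ _ _ _ hg hv]; exact hx
      · rw [goA_fresh f key g v hg (by simpa using hv)]
        apply contains_loopA f ih
        rw [PySem.Dict.contains_insert]
        simp [hx]
    · rw [goA_leaf _ _ _ _ (by simpa using hg)]; exact hx

-- Nodup keys preserved
theorem nodup_keys_modify {κ ν : Type} [BEq κ] [LawfulBEq κ] (d : PySem.Dict κ ν) (k : κ) (d0 : ν) (f : ν → ν)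
    (h : d.keys.Nodup) : (d.modify k d0 f).keys.Nodup := by
  rw [PySem.Dict.keys_modify]
  exact PySem.Dict.nodup_keys_insert d k _ h

-- counting the yet-unvisited graph keys: the fuel really needed
def Ucnt (g : PySem.Dict String (List String)) (v : PySem.Dict String Int) : Nat :=
  (g.keys.filter (fun k => !v.contains k)).length

theorem filter_len_le {α : Type} (l : List α) (p q : α → Bool) (h : ∀ x, q x = true → p x = true) :
    (l.filter q).length ≤ (l.filter p).length := by
  induction l with
  | nil => simp
  | cons a t ih =>
    by_cases hq : q a = true
    · simp [hq, h a hq]; omega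
    · simp only [List.filter_cons]
      rw [Bool.not_eq_true] at hq
      rw [hq]
      cases hp : p a <;> simp <;> omega

theorem filter_len_lt {α : Type} (l : List α) (p q : α → Bool) (h : ∀ x, q x = true → p x = true)
    (a : α) (ha : a ∈ l) (hp : p a = true) (hq : q a = false) :
    (l.filter q).length < (l.filter p).length := by
  induction l with
  | nil => simp at ha
  | cons b t ih =>
    rcases List.mem_cons.mp ha with heq | hat
    · subst heq
      simp only [List.filter_cons, hp, hq]
      simp
      exact filter_len_le t p q h
    · have := ih hat
      by_cases hqb : q b = true
      · simp [hqb, h b hqb]; omega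
      · simp only [List.filter_cons]
        rw [Bool.not_eq_true] at hqb
        rw [hqb]
        cases hpb : p b <;> simp <;> omega

theorem Ucnt_le_of_contains (g : PySem.Dict String (List String)) (v v' : PySem.Dict String Int)
    (h : ∀ x, v.contains x = true → v'.contains x = true) : Ucnt g v' ≤ Ucnt g v := by
  apply filter_len_le
  intro x hx
  simp only [Bool.not_eq_true'] at hx ⊢
  cases hvx : v.contains x
  · rfl
  · exact absurd (h x hvx) (by simp [hx])

theorem Ucnt_pos (g : PySem.Dict String (List String)) (v : PySem.Dict String Int) (key : String)
    (hg : g.contains key = true) (hv : v.contains key = false) : 1 ≤ Ucnt g v := by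
  have hk : key ∈ g.keys := (PySem.Dict.contains_iff_mem_keys g key).mp hg
  have : key ∈ g.keys.filter (fun k => !v.contains k) := by
    simp [List.mem_filter, hk, hv]
  have := List.length_pos_of_mem this
  unfold Ucnt
  omega

theorem Ucnt_insert_lt (g : PySem.Dict String (List String)) (v : PySem.Dict String Int) (key : String)
    (hg : g.contains key = true) (hv : v.contains key = false) :
    Ucnt g (v.insert key 1) < Ucnt g v := by
  apply filter_len_lt
  · intro x hx
    simp only [Bool.not_eq_true'] at hx ⊢
    rw [PySem.Dict.contains_insert] at hx
    cases h : v.contains x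
    · rfl
    · simp [h] at hx
  · exact (PySem.Dict.contains_iff_mem_keys g key).mp hg
  · simp [hv]
  · simp

theorem Ucnt_le_keys (g : PySem.Dict String (List String)) (v : PySem.Dict String Int) :
    Ucnt g v ≤ g.keys.length :=
  List.length_filter_le _ _

-- fuel irrelevance: any fuel ≥ Ucnt computes the same result
theorem mono_main : ∀ (u : Nat) (g : PySem.Dict String (List String)),
    (∀ (key : String) (v : PySem.Dict String Int) (f1 f2 : Nat),
      Ucnt g v ≤ u → Ucnt g v ≤ f1 → Ucnt g v ≤ f2 → goA f1 key g v = goA f2 key g v) ∧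
    (∀ (items : List String) (key : String) (v : PySem.Dict String Int) (f1 f2 : Nat),
      Ucnt g v ≤ u → Ucnt g v ≤ f1 → Ucnt g v ≤ f2 → loopA f1 items key g v = loopA f2 items key g v) := by
  intro u
  induction u using Nat.strong_induction_on with
  | h u ih =>
    intro g
    have hgo : ∀ (key : String) (v : PySem.Dict String Int) (f1 f2 : Nat),
        Ucnt g v ≤ u → Ucnt g v ≤ f1 → Ucnt g v ≤ f2 → goA f1 key g v = goA f2 key g v := by
      intro key v f1 f2 hu h1 h2
      by_cases hg : g.contains key = true
      · by_cases hv : v.contains key = true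
        · rw [goA_visited _ _ _ _ hg hv, goA_visited _ _ _ _ hg hv]
        · have hv' : v.contains key = false := by simpa using hv
          have hpos := Ucnt_pos g v key hg hv'
          have hlt := Ucnt_insert_lt g v key hg hv'
          obtain ⟨a, rfl⟩ : ∃ a, f1 = a + 1 := ⟨f1 - 1, by omega⟩
          obtain ⟨b, rfl⟩ : ∃ b, f2 = b + 1 := ⟨f2 - 1, by omega⟩
          rw [goA_fresh a key g v hg hv', goA_fresh b key g v hg hv']
          have hloop := (ih (u - 1) (by omega) g).2 (g.getD key []) key (v.insert key 1) a b
            (by omega) (by omega) (by omega)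
          rw [hloop]
      · have hg' : g.contains key = false := by simpa using hg
        rw [goA_leaf _ _ _ _ hg', goA_leaf _ _ _ _ hg']
    refine ⟨hgo, ?_⟩
    intro items
    induction items with
    | nil => intro key v f1 f2 _ _ _; rw [loopA_nil, loopA_nil]
    | cons c rest ihi =>
      intro key v f1 f2 hu h1 h2
      rw [loopA_cons, loopA_cons]
      rw [hgo c v f1 f2 hu h1 h2]
      set v1 := (goA f2 c g v).2.modify key 0 (· + (goA f2 c g v).1) with hv1
      have hmon : Ucnt g v1 ≤ Ucnt g v := by
        apply Ucnt_le_of_contains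
        intro x hx
        rw [hv1, PySem.Dict.contains_modify]
        simp [contains_goA f2 c g v x hx]
      exact ihi key v1 f1 f2 (le_trans hmon hu) (le_trans hmon h1) (le_trans hmon h2)

-- d[k] += 0 is the identity on a dict with unique keys containing k
theorem find?_eq_of_mem_nodup (l : List (String × Int)) (k : String) (p : String × Int)
    (hn : (l.map Prod.fst).Nodup) (hp : p ∈ l) (hk : p.1 = k) :
    l.find? (fun q => q.1 == k) = some p := by
  induction l with
  | nil => simp at hp
  | cons b t ih =>
    simp only [List.map_cons, List.nodup_cons] at hn
    rcases List.mem_cons.mp hp with heq | hpt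
    · subst heq
      rw [List.find?_cons_of_pos (by simp [hk])]
    · have hbk : (b.1 == k) = false := by
        simp only [beq_eq_false_iff_ne, ne_eq]
        intro hbk
        exact hn.1 (hbk ▸ hk ▸ (List.mem_map.mpr ⟨p, hpt, rfl⟩))
      rw [List.find?_cons_of_neg (by simp_all)]
      exact ih hn.2 hpt

theorem dict_modify_add_zero (d : PySem.Dict String Int) (k : String)
    (hn : d.keys.Nodup) (hk : d.contains k = true) : d.modify k 0 (· + 0) = d := by
  obtain ⟨l⟩ := d
  have hk' := hk
  simp only [PySem.Dict.contains, List.any_eq_true] at hk'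
  obtain ⟨p, hp, hpk⟩ := hk'
  have hpk' : p.1 = k := by simpa using hpk
  have hfind : l.find? (fun q => q.1 == k) = some p :=
    find?_eq_of_mem_nodup l k p (by simpa [PySem.Dict.keys] using hn) hp hpk'
  have hgd : (PySem.Dict.mk l).getD k 0 = p.2 := by
    simp [PySem.Dict.getD, PySem.Dict.get?, hfind]
  simp only [PySem.Dict.modify, PySem.Dict.insert, hk, if_pos, hgd]
  congr 1
  simp only [Int.add_zero]
  conv_rhs => rw [← List.map_id l]
  apply List.map_congr_left
  intro q hq
  by_cases hqk : (q.1 == k) = true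
  · have hq1 : q.1 = k := by simpa using hqk
    have : q = p := by
      have := find?_eq_of_mem_nodup l k q (by simpa [PySem.Dict.keys] using hn) hq hq1
      rw [hfind] at this
      exact (Option.some_inj.mp this).symm
    subst this
    rw [← hpk']
    simp
  · simp [hqk]

-- the denotation of a machine state in terms of A's loop
def denote (g : PySem.Dict String (List String)) :
    List (String × List String) → PySem.Dict String Int → PySem.Dict String Int
  | [], v => v
  | (node, todo) :: rest, v =>
    match rest with
    | [] => loopA (Ucnt g v) todo node g v
    | (p, _) :: _ =>
      let w := loopA (Ucnt g v) todo node g v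
      denote g rest (w.modify p 0 (· + w.getD node 0))

-- unfolding lemmas for the machine
theorem runB_nil (f : Nat) (g : PySem.Dict String (List String)) (v : PySem.Dict String Int) :
    runB f g [] v = v := by simp [runB]

theorem runB_leaf (f : Nat) (g : PySem.Dict String (List String)) (node c : String) (todo' : List String)
    (rest : List (String × List String)) (v : PySem.Dict String Int) (h : g.contains c = false) :
    runB f g ((node, c :: todo') :: rest) v = runB f g ((node, todo') :: rest) (v.modify node 0 (· + 1)) := by
  cases f <;> simp [runB, h]

theorem runB_vis (f : Nat) (g : PySem.Dict String (List String)) (node c : String) (todo' : List String)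
    (rest : List (String × List String)) (v : PySem.Dict String Int)
    (h1 : g.contains c = true) (h2 : v.contains c = true) :
    runB f g ((node, c :: todo') :: rest) v = runB f g ((node, todo') :: rest) v := by
  cases f <;> simp [runB, h1, h2]

theorem runB_fresh (f : Nat) (g : PySem.Dict String (List String)) (node c : String) (todo' : List String)
    (rest : List (String × List String)) (v : PySem.Dict String Int)
    (h1 : g.contains c = true) (h2 : v.contains c = false) :
    runB (f + 1) g ((node, c :: todo') :: rest) v =
      runB f g ((c, g.getD c []) :: (node, todo') :: rest) (v.insert c 1) := by
  simp [runB, h1, h2]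

theorem runB_pop_nil (f : Nat) (g : PySem.Dict String (List String)) (node : String) (v : PySem.Dict String Int) :
    runB f g [(node, [])] v = v := by simp [runB]

theorem runB_pop_cons (f : Nat) (g : PySem.Dict String (List String)) (node p : String) (q : List String)
    (rest' : List (String × List String)) (v : PySem.Dict String Int) :
    runB f g ((node, []) :: (p, q) :: rest') v =
      runB f g ((p, q) :: rest') (v.modify p 0 (· + v.getD node 0)) := by
  simp [runB]

-- unfolding lemmas for the denotation
theorem denote_nil (g : PySem.Dict String (List String)) (v : PySem.Dict String Int) :
    denote g [] v = v := by simp [denote]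

theorem denote_last (g : PySem.Dict String (List String)) (node : String) (todo : List String)
    (v : PySem.Dict String Int) :
    denote g [(node, todo)] v = loopA (Ucnt g v) todo node g v := by simp [denote]

theorem denote_cons (g : PySem.Dict String (List String)) (node : String) (todo : List String)
    (p : String) (q : List String) (rest' : List (String × List String)) (v : PySem.Dict String Int) :
    denote g ((node, todo) :: (p, q) :: rest') v =
      denote g ((p, q) :: rest')
        ((loopA (Ucnt g v) todo node g v).modify p 0
          (· + (loopA (Ucnt g v) todo node g v).getD node 0)) := by
  simp [denote]

-- one machine step, mirrored on the denotation
theorem denote_leaf (g : PySem.Dict String (List String)) (node c : String) (todo' : List String)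
    (rest : List (String × List String)) (v : PySem.Dict String Int) (hgc : g.contains c = false) :
    denote g ((node, c :: todo') :: rest) v =
      denote g ((node, todo') :: rest) (v.modify node 0 (· + 1)) := by
  set v2 := v.modify node 0 (· + 1) with hv2
  have hU2 : Ucnt g v2 ≤ Ucnt g v := by
    apply Ucnt_le_of_contains
    intro x hx
    rw [hv2, PySem.Dict.contains_modify]
    simp [hx]
  have hw : loopA (Ucnt g v) (c :: todo') node g v = loopA (Ucnt g v2) todo' node g v2 := by
    rw [loopA_cons, goA_leaf _ _ _ _ hgc]
    exact (mono_main (Ucnt g v) g).2 todo' node v2 (Ucnt g v) (Ucnt g v2) hU2 hU2 le_rfl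
  cases rest with
  | nil => rw [denote_last, denote_last, hw]
  | cons pr rest' =>
    obtain ⟨p, q⟩ := pr
    rw [denote_cons, denote_cons, hw]

theorem denote_visited (g : PySem.Dict String (List String)) (node c : String) (todo' : List String)
    (rest : List (String × List String)) (v : PySem.Dict String Int)
    (hgc : g.contains c = true) (hvc : v.contains c = true)
    (hnode : v.contains node = true) (hnd : v.keys.Nodup) :
    denote g ((node, c :: todo') :: rest) v = denote g ((node, todo') :: rest) v := by
  have hw : loopA (Ucnt g v) (c :: todo') node g v = loopA (Ucnt g v) todo' node g v := by
    rw [loopA_cons, goA_visited _ _ _ _ hgc hvc]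
    rw [show ((0 : Int), v).2.modify node 0 (· + ((0 : Int), v).1) = v.modify node 0 (· + 0) from rfl]
    rw [dict_modify_add_zero v node hnd hnode]
  cases rest with
  | nil => rw [denote_last, denote_last, hw]
  | cons pr rest' =>
    obtain ⟨p, q⟩ := pr
    rw [denote_cons, denote_cons, hw]

theorem denote_fresh (g : PySem.Dict String (List String)) (node c : String) (todo' : List String)
    (rest : List (String × List String)) (v : PySem.Dict String Int)
    (hgc : g.contains c = true) (hvc : v.contains c = false) :
    denote g ((node, c :: todo') :: rest) v =
      denote g ((c, g.getD c []) :: (node, todo') :: rest) (v.insert c 1) := by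
  set v' := v.insert c 1 with hv'
  have hpos := Ucnt_pos g v c hgc hvc
  obtain ⟨m, hm⟩ : ∃ m, Ucnt g v = m + 1 := ⟨Ucnt g v - 1, by omega⟩
  have hlt : Ucnt g v' < Ucnt g v := Ucnt_insert_lt g v c hgc hvc
  set wc := loopA (Ucnt g v') (g.getD c []) c g v' with hwc
  have hcv' : ∀ x, v.contains x = true → v'.contains x = true := by
    intro x hx
    rw [hv', PySem.Dict.contains_insert]
    simp [hx]
  have hcwc : ∀ x, v.contains x = true → wc.contains x = true := by
    intro x hx
    rw [hwc]
    exact contains_loopA _ (contains_goA _) _ c g v' x (hcv' x hx)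
  have hwceq : loopA m (g.getD c []) c g v' = wc := by
    rw [hwc]
    exact (mono_main m g).2 (g.getD c []) c v' m (Ucnt g v') (by omega) (by omega) le_rfl
  set v2 := wc.modify node 0 (· + wc.getD c 0) with hv2
  have hU2 : Ucnt g v2 ≤ Ucnt g v := by
    apply Ucnt_le_of_contains
    intro x hx
    rw [hv2, PySem.Dict.contains_modify]
    simp [hcwc x hx]
  have hw : loopA (Ucnt g v) (c :: todo') node g v = loopA (Ucnt g v2) todo' node g v2 := by
    rw [hm, loopA_cons, goA_fresh m c g v hgc hvc, hwceq]
    rw [show ((wc.getD c 0, wc) : Int × PySem.Dict String Int).2.modify node 0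
          (· + ((wc.getD c 0, wc) : Int × PySem.Dict String Int).1) = v2 from rfl]
    rw [← hm]
    exact (mono_main (Ucnt g v) g).2 todo' node v2 (Ucnt g v) (Ucnt g v2) hU2 hU2 le_rfl
  have hrhs : denote g ((c, g.getD c []) :: (node, todo') :: rest) v' =
      denote g ((node, todo') :: rest) v2 := by
    rw [denote_cons, ← hwc, ← hv2]
  rw [hrhs]
  cases rest with
  | nil => rw [denote_last, denote_last, hw]
  | cons pr rest' =>
    obtain ⟨p, q⟩ := pr
    rw [denote_cons, denote_cons, hw]

-- the machine computes the denotation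
theorem sim (f : Nat) (g : PySem.Dict String (List String)) :
    ∀ (n : Nat) (stack : List (String × List String)) (v : PySem.Dict String Int),
      szB stack ≤ n → Ucnt g v ≤ f → (∀ fr ∈ stack, v.contains fr.1 = true) → v.keys.Nodup →
      runB f g stack v = denote g stack v := by
  induction f with
  | zero =>
    intro n
    induction n with
    | zero =>
      intro stack v hsz hU hinv hnd
      cases stack with
      | nil => rw [runB_nil, denote_nil]
      | cons fr rest => obtain ⟨node, todo⟩ := fr; simp [szB] at hsz
    | succ n ihn =>
      intro stack v hsz hU hinv hnd
      cases stack with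
      | nil => rw [runB_nil, denote_nil]
      | cons fr rest =>
        obtain ⟨node, todo⟩ := fr
        cases todo with
        | cons c todo' =>
          have hinv' : ∀ fr ∈ (node, todo') :: rest, v.contains fr.1 = true := by
            intro fr hfr
            rcases List.mem_cons.mp hfr with h | h
            · subst h; exact hinv (node, c :: todo') (by simp)
            · exact hinv fr (List.mem_cons_of_mem _ h)
          have hsz' : szB ((node, todo') :: rest) ≤ n := by simp [szB] at hsz ⊢; omega
          by_cases hgc : g.contains c = true
          · by_cases hvc : v.contains c = true
            · rw [runB_vis _ _ _ _ _ _ _ hgc hvc, ihn _ v hsz' hU hinv' hnd]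
              exact (denote_visited _ _ _ _ _ _ hgc hvc
                (hinv (node, c :: todo') (by simp)) hnd).symm
            · exfalso
              have := Ucnt_pos g v c hgc (by simpa using hvc)
              omega
          · have hgc' : g.contains c = false := by simpa using hgc
            set v2 := v.modify node 0 (· + 1) with hv2
            have hc2 : ∀ x, v.contains x = true → v2.contains x = true := by
              intro x hx; rw [hv2, PySem.Dict.contains_modify]; simp [hx]
            rw [runB_leaf _ _ _ _ _ _ _ hgc',
              ihn _ v2 hsz' (le_trans (Ucnt_le_of_contains g v v2 hc2) hU)
                (fun fr hfr => hc2 fr.1 (hinv' fr hfr)) (nodup_keys_modify v node 0 _ hnd)]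
            exact (denote_leaf _ _ _ _ _ _ hgc').symm
        | nil =>
          cases rest with
          | nil => rw [runB_pop_nil, denote_last, loopA_nil]
          | cons pr rest' =>
            obtain ⟨p, q⟩ := pr
            set v2 := v.modify p 0 (· + v.getD node 0) with hv2
            have hc2 : ∀ x, v.contains x = true → v2.contains x = true := by
              intro x hx; rw [hv2, PySem.Dict.contains_modify]; simp [hx]
            have hsz' : szB ((p, q) :: rest') ≤ n := by simp [szB] at hsz ⊢; omega
            rw [runB_pop_cons,
              ihn _ v2 hsz' (le_trans (Ucnt_le_of_contains g v v2 hc2) hU)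
                (fun fr hfr => hc2 fr.1 (hinv fr (List.mem_cons_of_mem _ hfr)))
                (nodup_keys_modify v p 0 _ hnd),
              denote_cons, loopA_nil]
  | succ f ihf =>
    intro n
    induction n with
    | zero =>
      intro stack v hsz hU hinv hnd
      cases stack with
      | nil => rw [runB_nil, denote_nil]
      | cons fr rest => obtain ⟨node, todo⟩ := fr; simp [szB] at hsz
    | succ n ihn =>
      intro stack v hsz hU hinv hnd
      cases stack with
      | nil => rw [runB_nil, denote_nil]
      | cons fr rest =>
        obtain ⟨node, todo⟩ := fr
        cases todo with
        | cons c todo' =>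
          have hinv' : ∀ fr ∈ (node, todo') :: rest, v.contains fr.1 = true := by
            intro fr hfr
            rcases List.mem_cons.mp hfr with h | h
            · subst h; exact hinv (node, c :: todo') (by simp)
            · exact hinv fr (List.mem_cons_of_mem _ h)
          have hsz' : szB ((node, todo') :: rest) ≤ n := by simp [szB] at hsz ⊢; omega
          by_cases hgc : g.contains c = true
          · by_cases hvc : v.contains c = true
            · rw [runB_vis _ _ _ _ _ _ _ hgc hvc, ihn _ v hsz' hU hinv' hnd]
              exact (denote_visited _ _ _ _ _ _ hgc hvc
                (hinv (node, c :: todo') (by simp)) hnd).symm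
            · have hvc' : v.contains c = false := by simpa using hvc
              set v1 := v.insert c 1 with hv1
              have hc1 : ∀ x, v.contains x = true → v1.contains x = true := by
                intro x hx; rw [hv1, PySem.Dict.contains_insert]; simp [hx]
              have hinv1 : ∀ fr ∈ (c, g.getD c []) :: (node, todo') :: rest,
                  v1.contains fr.1 = true := by
                intro fr hfr
                rcases List.mem_cons.mp hfr with h | h
                · subst h; rw [hv1, PySem.Dict.contains_insert]; simp
                · exact hc1 fr.1 (hinv' fr h)
              rw [runB_fresh _ _ _ _ _ _ _ hgc hvc',
                ihf (szB ((c, g.getD c []) :: (node, todo') :: rest)) _ v1 le_rfl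
                  (by rw [hv1]; have := Ucnt_insert_lt g v c hgc hvc'; omega)
                  hinv1 (PySem.Dict.nodup_keys_insert v c 1 hnd)]
              exact (denote_fresh _ _ _ _ _ _ hgc hvc').symm
          · have hgc' : g.contains c = false := by simpa using hgc
            set v2 := v.modify node 0 (· + 1) with hv2
            have hc2 : ∀ x, v.contains x = true → v2.contains x = true := by
              intro x hx; rw [hv2, PySem.Dict.contains_modify]; simp [hx]
            rw [runB_leaf _ _ _ _ _ _ _ hgc',
              ihn _ v2 hsz' (le_trans (Ucnt_le_of_contains g v v2 hc2) hU)
                (fun fr hfr => hc2 fr.1 (hinv' fr hfr)) (nodup_keys_modify v node 0 _ hnd)]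
            exact (denote_leaf _ _ _ _ _ _ hgc').symm
        | nil =>
          cases rest with
          | nil => rw [runB_pop_nil, denote_last, loopA_nil]
          | cons pr rest' =>
            obtain ⟨p, q⟩ := pr
            set v2 := v.modify p 0 (· + v.getD node 0) with hv2
            have hc2 : ∀ x, v.contains x = true → v2.contains x = true := by
              intro x hx; rw [hv2, PySem.Dict.contains_modify]; simp [hx]
            have hsz' : szB ((p, q) :: rest') ≤ n := by simp [szB] at hsz ⊢; omega
            rw [runB_pop_cons,
              ihn _ v2 hsz' (le_trans (Ucnt_le_of_contains g v v2 hc2) hU)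
                (fun fr hfr => hc2 fr.1 (hinv fr (List.mem_cons_of_mem _ hfr)))
                (nodup_keys_modify v p 0 _ hnd),
              denote_cons, loopA_nil]

-- ===== VERDICT (by name: the statement is the Claim_ definition above) =====
theorem find_followers_spec : Claim_equal_find_followers := by
  intro key graph_edges visited_vertex_list _
  unfold Spec_find_followers find_followers find_followers_alt
  simp only []
  set g := PySem.Dict.ofList graph_edges with hg
  set v := PySem.Dict.ofList visited_vertex_list with hv
  by_cases hgk : g.contains key = true
  · by_cases hvk : v.contains key = true
    · rw [goA_visited _ _ _ _ hgk hvk]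
      simp [hgk, hvk]
    · have hvk' : v.contains key = false := by simpa using hvk
      set v1 := v.insert key 1 with hv1
      have hU1 : Ucnt g v1 ≤ g.keys.length := Ucnt_le_keys g v1
      have hnd1 : v1.keys.Nodup :=
        PySem.Dict.nodup_keys_insert v key 1 (PySem.Dict.nodup_keys_ofList visited_vertex_list)
      have hsim := sim (g.keys.length + 1) g (szB [(key, g.getD key [])]) [(key, g.getD key [])] v1
        le_rfl (by omega)
        (by intro fr hfr
            simp at hfr
            rw [hfr, hv1, PySem.Dict.contains_insert]
            simp)
        hnd1
      rw [goA_fresh _ _ _ _ hgk hvk']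
      simp only [hgk, hvk', Bool.not_true, if_false, Bool.false_eq_true]
      rw [hsim, denote_last]
      congr 1
      exact (mono_main (g.keys.length) g).2 (g.getD key []) key v1 g.keys.length
        (Ucnt g v1) hU1 hU1 le_rfl
  · have hgk' : g.contains key = false := by simpa using hgk
    rw [goA_leaf _ _ _ _ hgk']
    simp [hgk']
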